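-- pv_equiv track=rewrite | github.com/Byongho96/algorithm_practice | Baekjoon/10800_컬러볼.py | solution
-- ===== SOURCE A (Python) =====
-- from typing import List, Tuple
--
-- def solution(N:int, balls: List[Tuple[int]]) -> List[int]:
--     # total cumulative sum
--     total = 0
--     total_by_color = [0] * (N + 1)
--
--     # buffer cumulative sum
--     # [sum of buffer, ball size]
--     buffer_size_total = [0, 0]
--     buffer_size_by_color = [[0, 0] for _ in range(N + 1)]
--
--     # sort by size
--     balls.sort(key=lambda x: x[1])
--
--     answer = [0] * N
--     for i in range(N):
--         color, size, idx = balls[i]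
--
--         # transfer the buffer
--         if buffer_size_total[1] != size:
--             total += buffer_size_total[0]
--             buffer_size_total[0] = 0
--
--         if buffer_size_by_color[color][1] != size:
--             total_by_color[color] += buffer_size_by_color[color][0]
--             buffer_size_by_color[color][0] = 0
--
--         # calculate the sum of catchable balls size
--         answer[idx] = total - total_by_color[color]
--
--         # record the data into the buffer
--         buffer_size_total[0] += size
--         buffer_size_total[1] = size
--         buffer_size_by_color[color][0] += size
--         buffer_size_by_color[color][1] = size
--
--     return answer
-- ===== SOURCE B (Python) =====
-- def solution(N, balls):
--     # Group-based two-phase sweep: sort by size (in place, like A), then for each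
--     # run of equal-size balls publish answers from the strictly-smaller totals,
--     # then fold the whole run into the totals. No per-color buffers needed.
--     balls.sort(key=lambda x: x[1])
--     total = 0
--     total_by_color = [0] * (N + 1)
--     answer = [0] * N
--     rest = [balls[k] for k in range(N)]
--     while rest:
--         s0 = rest[0][1]
--         k = 1
--         while k < len(rest) and rest[k][1] == s0:
--             k += 1
--         group, rest = rest[:k], rest[k:]
--         for color, _, idx in group:
--             answer[idx] = total - total_by_color[color]
--         for color, size, _ in group:
--             total += size
--             total_by_color[color] += size
--     return answer
-- ===== Notes on version B (the rewrite author's own statement) =====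
-- stated objective: simpler
-- what changed: A simulates deferred updates with a global size-tagged buffer plus one size-tagged buffer per color that are lazily flushed ball by ball; B removes all buffer machinery and instead walks the sorted list one maximal equal-size run at a time, first publishing every answer of the run from the strictly-smaller totals and then folding the whole run into total/total_by_color.
-- outside the precondition, e.g. on solution(1, [(0, 1, 0), (5, 2, 0)]): A returns [0], B returns [0]
import Mathlib
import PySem

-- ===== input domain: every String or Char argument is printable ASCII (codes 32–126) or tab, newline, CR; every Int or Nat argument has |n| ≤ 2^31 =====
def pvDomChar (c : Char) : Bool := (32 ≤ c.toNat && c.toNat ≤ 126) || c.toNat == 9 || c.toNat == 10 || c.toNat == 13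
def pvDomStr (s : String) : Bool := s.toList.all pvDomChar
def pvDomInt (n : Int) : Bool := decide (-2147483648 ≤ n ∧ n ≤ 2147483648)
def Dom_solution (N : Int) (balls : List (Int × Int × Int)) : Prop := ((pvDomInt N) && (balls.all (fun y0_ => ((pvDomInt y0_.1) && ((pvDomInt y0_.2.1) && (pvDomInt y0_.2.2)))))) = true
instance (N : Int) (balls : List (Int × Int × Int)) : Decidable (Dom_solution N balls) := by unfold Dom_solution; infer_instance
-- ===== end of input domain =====

-- B replaces A's per-color "buffer with size tag" machinery by a group-based two-phase
-- sweep over runs of equal size (publish answers, then fold the run into the totals);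
-- equivalence is about the return value — both A and B sort `balls` in place (same mutation).

-- ===== PORT A =====
-- one iteration of A's `for i in range(N)` body; the state is
-- (total, total_by_color, buffer_size_total, buffer_size_by_color, answer)
def stepA (st : Int × List Int × (Int × Int) × List (Int × Int) × List Int)
    (b : Int × Int × Int) : Int × List Int × (Int × Int) × List (Int × Int) × List Int :=
  let t := st.1; let m := st.2.1; let p := st.2.2.1; let q := st.2.2.2.1; let a := st.2.2.2.2
  let c := b.1; let s := b.2.1; let i := b.2.2
  -- transfer the buffer
  let t1 := if p.2 ≠ s then t + p.1 else t
  let p1 : Int × Int := if p.2 ≠ s then (0, p.2) else p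
  let bc := PySem.List.pyGetD q c ((0:Int), (0:Int))
  let m1 := if bc.2 ≠ s then PySem.List.pySetD m c (PySem.List.pyGetD m c 0 + bc.1) else m
  let q1 := if bc.2 ≠ s then PySem.List.pySetD q c ((0:Int), bc.2) else q
  -- calculate the sum of catchable balls size
  let a1 := PySem.List.pySetD a i (t1 - PySem.List.pyGetD m1 c 0)
  -- record the data into the buffer
  let p2 : Int × Int := (p1.1 + s, s)
  let bc1 := PySem.List.pyGetD q1 c ((0:Int), (0:Int))
  let q2 := PySem.List.pySetD q1 c (bc1.1 + s, s)
  (t1, m1, p2, q2, a1)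

def solution (N : Int) (balls : List (Int × Int × Int)) : List Int :=
  let total : Int := 0
  let tbc : List Int := List.replicate (N + 1).toNat 0
  let bufT : Int × Int := (0, 0)
  let bufC : List (Int × Int) := List.replicate (N + 1).toNat (0, 0)
  let sb := PySem.List.sorted balls (fun x => x.2.1) false
  let ans : List Int := List.replicate N.toNat 0
  let st := (PySem.List.pyRange 0 N 1).foldl
    (fun st i => stepA st (PySem.List.pyGetD sb i ((0:Int), (0:Int), (0:Int))))
    (total, tbc, bufT, bufC, ans)
  st.2.2.2.2

-- ===== PORT B =====
-- `for color, _, idx in group: answer[idx] = total - total_by_color[color]`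
def writeGroup (total : Int) (tbc : List Int) (grp : List (Int × Int × Int)) (ans : List Int) : List Int :=
  grp.foldl (fun a x => PySem.List.pySetD a x.2.2 (total - PySem.List.pyGetD tbc x.1 0)) ans

-- `for _, size, _ in group: total += size`
def addGroupTotal (grp : List (Int × Int × Int)) (total : Int) : Int :=
  grp.foldl (fun t x => t + x.2.1) total

-- `for color, size, _ in group: total_by_color[color] += size`
def addGroupColor (grp : List (Int × Int × Int)) (tbc : List Int) : List Int :=
  grp.foldl (fun m x => PySem.List.pySetD m x.1 (PySem.List.pyGetD m x.1 0 + x.2.1)) tbc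

-- the `while rest:` loop of B: peel one maximal run of equal size per step
def solveG : List (Int × Int × Int) → Int → List Int → List Int → List Int
  | [], _, _, ans => ans
  | b :: tl, total, tbc, ans =>
    let grp := b :: tl.takeWhile (fun x => x.2.1 == b.2.1)
    let rest := tl.dropWhile (fun x => x.2.1 == b.2.1)
    solveG rest (addGroupTotal grp total) (addGroupColor grp tbc) (writeGroup total tbc grp ans)
termination_by l => l.length
decreasing_by
  simp only [List.length_cons]
  exact Nat.lt_succ_of_le (List.Sublist.length_le (List.dropWhile_sublist _))

def solution_alt (N : Int) (balls : List (Int × Int × Int)) : List Int :=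
  let sb := PySem.List.sorted balls (fun x => x.2.1) false
  let tbc : List Int := List.replicate (N + 1).toNat 0
  let ans : List Int := List.replicate N.toNat 0
  let rest := (PySem.List.pyRange 0 N 1).map
    (fun k => PySem.List.pyGetD sb k ((0:Int), (0:Int), (0:Int)))
  solveG rest 0 tbc ans

-- ===== PRECONDITION & SPEC =====
-- Pre_ excludes exactly the inputs where Python A raises IndexError (N exceeding len(balls),
-- a color outside the wraparound range of the length-(N+1) color table, an idx outside the
-- wraparound range of the length-N answer list); the per-ball bounds are stated for every ball
-- of the list, which also excludes some malformed inputs (out-of-range data hidden beyond the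
-- N-th sorted position) on which A happens to return — see the cite in the claim.
def Pre_solution (N : Int) (balls : List (Int × Int × Int)) : Prop :=
  N ≤ balls.length ∧
    (0 < N → ∀ b ∈ balls, -(N + 1) ≤ b.1 ∧ b.1 ≤ N ∧ -N ≤ b.2.2 ∧ b.2.2 < N)
instance (N : Int) (balls : List (Int × Int × Int)) : Decidable (Pre_solution N balls) := by
  unfold Pre_solution; infer_instance

def pvWitness_solution : Int × (List (Int × Int × Int)) := (2, [(1, 3, 0), (2, 1, 1)])

def Spec_solution (N : Int) (balls : List (Int × Int × Int)) (out : List Int) : Prop := out = solution_alt N balls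
instance (N : Int) (balls : List (Int × Int × Int)) (out : List Int) : Decidable (Spec_solution N balls out) := by unfold Spec_solution; infer_instance

-- ===== CLAIM (what is proved, stated in full; the proofs are below) =====
def Claim_equal_solution : Prop := ∀ (N : Int) (balls : List (Int × Int × Int)), Dom_solution N balls → Pre_solution N balls → Spec_solution N balls (solution N balls)

-- ===== LEMMAS AND PROOFS =====

-- index-resolution views of the PySem list primitives
theorem pyIdx?_lt {n : Nat} {i : Int} {k : Nat} (h : PySem.List.pyIdx? n i = some k) : k < n := by
  unfold PySem.List.pyIdx? at h
  split_ifs at h <;> simp_all <;> omega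

theorem pyGetD_idx {α : Type} (xs : List α) (i : Int) (d : α) :
    PySem.List.pyGetD xs i d =
      (match PySem.List.pyIdx? xs.length i with
        | some k => xs.getD k d
        | none => d) := by
  unfold PySem.List.pyGetD PySem.List.pyGet?
  cases h : PySem.List.pyIdx? xs.length i <;> simp [List.getD_eq_getElem?_getD]

theorem pySetD_idx {α : Type} (xs : List α) (i : Int) (v : α) :
    PySem.List.pySetD xs i v =
      (match PySem.List.pyIdx? xs.length i with
        | some k => xs.set k v
        | none => xs) := by
  unfold PySem.List.pySetD PySem.List.pySet?
  cases h : PySem.List.pyIdx? xs.length i <;> simp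

theorem getD_set' {α : Type} (xs : List α) (k : Nat) (v : α) (j : Nat) (d : α) :
    (xs.set k v).getD j d = if j = k ∧ k < xs.length then v else xs.getD j d := by
  simp only [List.getD_eq_getElem?_getD, List.getElem?_set]
  split_ifs <;> simp_all

theorem getD_replicate' {α : Type} (n k : Nat) (a : α) :
    (List.replicate n a).getD k a = a := by
  simp only [List.getD_eq_getElem?_getD, List.getElem?_replicate]
  split <;> simp

theorem head_dropWhile_false {α : Type} (p : α → Bool) :
    ∀ (l : List α) (y : α) (ys : List α), l.dropWhile p = y :: ys → p y = false := by
  intro l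
  induction l with
  | nil => intro y ys h; simp [List.dropWhile] at h
  | cons a l ih =>
    intro y ys h
    by_cases hp : p a
    · rw [List.dropWhile_cons_of_pos hp] at h; exact ih y ys h
    · rw [List.dropWhile_cons_of_neg hp] at h
      cases h; simpa using hp

-- per-slot coupling between A's color arrays and B's color totals, at current size s
abbrev CInv (s : Int) (m₀ m m₁ : List Int) (q : List (Int × Int)) : Prop :=
  ∀ k : Nat,
    (m.getD k 0 + (q.getD k ((0:Int), (0:Int))).1 = m₁.getD k 0) ∧
    ((q.getD k ((0:Int), (0:Int))).2 = s → m.getD k 0 = m₀.getD k 0) ∧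
    ((q.getD k ((0:Int), (0:Int))).2 ≠ s → m₁.getD k 0 = m₀.getD k 0) ∧
    ((q.getD k ((0:Int), (0:Int))).1 = 0 ∨ (q.getD k ((0:Int), (0:Int))).2 ≤ s)

-- coupling invariant between A's state and B's state at a group boundary:
-- next sizes are all ≥ s, the buffers hold only strictly-smaller flushable content
def GInv (s t : Int) (m : List Int) (p : Int × Int) (q : List (Int × Int))
    (t' : Int) (m' : List Int) : Prop :=
  m.length = m'.length ∧ q.length = m.length ∧
  t + p.1 = t' ∧ (p.1 = 0 ∨ p.2 < s) ∧
  ∀ k : Nat,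
    (m.getD k 0 + (q.getD k ((0:Int), (0:Int))).1 = m'.getD k 0) ∧
    ((q.getD k ((0:Int), (0:Int))).1 = 0 ∨ (q.getD k ((0:Int), (0:Int))).2 < s)

-- mid-group invariant: t₀/m₀ are B's published totals for the current group,
-- t₁/m₁ are B's running totals including the already-processed part of the group
def MInv (s t₀ : Int) (m₀ : List Int) (t : Int) (m : List Int) (p : Int × Int)
    (q : List (Int × Int)) (t₁ : Int) (m₁ : List Int) : Prop :=
  m.length = m₀.length ∧ m₁.length = m₀.length ∧ q.length = m.length ∧
  t + p.1 = t₁ ∧ (p.2 = s → t = t₀) ∧ (p.2 ≠ s → t₁ = t₀) ∧ (p.1 = 0 ∨ p.2 ≤ s) ∧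
  ∀ k : Nat,
    (m.getD k 0 + (q.getD k ((0:Int), (0:Int))).1 = m₁.getD k 0) ∧
    ((q.getD k ((0:Int), (0:Int))).2 = s → m.getD k 0 = m₀.getD k 0) ∧
    ((q.getD k ((0:Int), (0:Int))).2 ≠ s → m₁.getD k 0 = m₀.getD k 0) ∧
    ((q.getD k ((0:Int), (0:Int))).1 = 0 ∨ (q.getD k ((0:Int), (0:Int))).2 ≤ s)

theorem ginv_to_mid {s t : Int} {m : List Int} {p : Int × Int} {q : List (Int × Int)}
    {t' : Int} {m' : List Int} (h : GInv s t m p q t' m') :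
    MInv s t' m' t m p q t' m' := by
  obtain ⟨h1, h2, h3, h4, h5⟩ := h
  refine ⟨h1, h1.symm ▸ rfl, h2, h3, ?_, fun _ => rfl, ?_, ?_⟩
  · intro hps
    rcases h4 with h4 | h4
    · omega
    · omega
  · rcases h4 with h4 | h4
    · exact Or.inl h4
    · exact Or.inr (le_of_lt h4)
  · intro k
    obtain ⟨hk1, hk2⟩ := h5 k
    refine ⟨hk1, ?_, fun _ => rfl, ?_⟩
    · intro hqs
      rcases hk2 with hk2 | hk2
      · omega
      · omega
    · rcases hk2 with hk2 | hk2
      · exact Or.inl hk2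
      · exact Or.inr (le_of_lt hk2)

theorem mid_to_ginv {s t₀ : Int} {m₀ : List Int} {t : Int} {m : List Int} {p : Int × Int}
    {q : List (Int × Int)} {t₁ : Int} {m₁ : List Int} {s' : Int}
    (h : MInv s t₀ m₀ t m p q t₁ m₁) (hs : s < s') :
    GInv s' t m p q t₁ m₁ := by
  obtain ⟨h1, h2, h3, h4, _, _, h7, h8⟩ := h
  refine ⟨h1.trans h2.symm, h3, h4, ?_, ?_⟩
  · rcases h7 with h7 | h7
    · exact Or.inl h7
    · exact Or.inr (lt_of_le_of_lt h7 hs)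
  · intro k
    obtain ⟨hk1, _, _, hk4⟩ := h8 k
    refine ⟨hk1, ?_⟩
    rcases hk4 with hk4 | hk4
    · exact Or.inl hk4
    · exact Or.inr (lt_of_le_of_lt hk4 hs)


theorem getD_set_self {α : Type} (xs : List α) (k : Nat) (v d : α) (h : k < xs.length) :
    (xs.set k v).getD k d = v := by
  rw [getD_set', if_pos ⟨rfl, h⟩]

theorem getD_set_ne {α : Type} (xs : List α) (j k : Nat) (v d : α) (h : j ≠ k) :
    (xs.set k v).getD j d = xs.getD j d := by
  rw [getD_set', if_neg (by tauto)]

-- the per-color effect of one ball of size s, no-flush case (buffer tag already = s)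
theorem color_noflush (s c : Int) (m₀ m m₁ : List Int) (q : List (Int × Int))
    (hlq : q.length = m.length) (hm0 : m₀.length = m.length) (hm1 : m₁.length = m.length)
    (hC : CInv s m₀ m m₁ q)
    (hcs : (PySem.List.pyGetD q c ((0:Int), (0:Int))).2 = s) :
    PySem.List.pyGetD m c 0 = PySem.List.pyGetD m₀ c 0
      ∧ CInv s m₀ m (PySem.List.pySetD m₁ c (PySem.List.pyGetD m₁ c 0 + s))
          (PySem.List.pySetD q c ((PySem.List.pyGetD q c ((0:Int), (0:Int))).1 + s, s)) := by
  rcases h0 : PySem.List.pyIdx? m.length c with _ | k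
  · simp only [pyGetD_idx, pySetD_idx, hlq, hm0, hm1, h0]
    exact ⟨trivial, hC⟩
  · have hk : k < m.length := pyIdx?_lt h0
    have hkq : k < q.length := by omega
    have hkm1 : k < m₁.length := by omega
    simp only [pyGetD_idx, pySetD_idx, hlq, hm0, hm1, h0] at hcs ⊢
    refine ⟨(hC k).2.1 hcs, ?_⟩
    intro j
    by_cases hjk : j = k
    · subst hjk
      simp only [getD_set_self, hkq, hkm1]
      obtain ⟨hk1, hk2, _, _⟩ := hC j
      exact ⟨by omega, fun _ => hk2 hcs, fun hh => absurd rfl hh, Or.inr le_rfl⟩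
    · simp only [getD_set_ne _ j k _ _ hjk]
      exact hC j

-- the per-color effect of one ball of size s, flush case (buffer tag ≠ s)
theorem color_flush (s c : Int) (m₀ m m₁ : List Int) (q : List (Int × Int))
    (hlq : q.length = m.length) (hm0 : m₀.length = m.length) (hm1 : m₁.length = m.length)
    (hC : CInv s m₀ m m₁ q)
    (hcs : (PySem.List.pyGetD q c ((0:Int), (0:Int))).2 ≠ s) :
    PySem.List.pyGetD (PySem.List.pySetD m c
        (PySem.List.pyGetD m c 0 + (PySem.List.pyGetD q c ((0:Int), (0:Int))).1)) c 0
      = PySem.List.pyGetD m₀ c 0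
    ∧ CInv s m₀
        (PySem.List.pySetD m c
          (PySem.List.pyGetD m c 0 + (PySem.List.pyGetD q c ((0:Int), (0:Int))).1))
        (PySem.List.pySetD m₁ c (PySem.List.pyGetD m₁ c 0 + s))
        (PySem.List.pySetD (PySem.List.pySetD q c ((0:Int), (PySem.List.pyGetD q c ((0:Int), (0:Int))).2)) c
          ((PySem.List.pyGetD (PySem.List.pySetD q c ((0:Int), (PySem.List.pyGetD q c ((0:Int), (0:Int))).2)) c
              ((0:Int), (0:Int))).1 + s, s))
    ∧ (PySem.List.pySetD m c
        (PySem.List.pyGetD m c 0 + (PySem.List.pyGetD q c ((0:Int), (0:Int))).1)).length = m.length := by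
  rcases h0 : PySem.List.pyIdx? m.length c with _ | k
  · simp only [pyGetD_idx, pySetD_idx, hlq, hm0, hm1, h0]
    exact ⟨by trivial, hC, by trivial⟩
  · have hk : k < m.length := pyIdx?_lt h0
    have hkq : k < q.length := by omega
    have hkm1 : k < m₁.length := by omega
    obtain ⟨hk1, hk2, hk3, hk4⟩ := hC k
    simp only [pyGetD_idx, hlq, h0] at hcs
    have hm0k : m.getD k 0 + (q.getD k ((0:Int),(0:Int))).1 = m₀.getD k 0 := by
      rw [hk1]; exact hk3 hcs
    simp only [pyGetD_idx, pySetD_idx, hlq, hm0, hm1, h0, List.length_set]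
    refine ⟨?_, ?_, True.intro⟩
    · rw [getD_set_self _ _ _ _ hk, hm0k]
    · intro j
      by_cases hjk : j = k
      · subst hjk
        have hkq2 : j < (q.set j ((0:Int), (q.getD j ((0:Int),(0:Int))).2)).length := by
          rw [List.length_set]; omega
        simp only [getD_set_self, hk, hkq, hkq2, hkm1]
        exact ⟨by omega, fun _ => hm0k ▸ (by omega), fun hh => absurd rfl hh, Or.inr le_rfl⟩
      · simp only [getD_set_ne _ j k _ _ hjk]
        exact hC j

-- one ball of the current group: A's step publishes B's value and re-establishes MInv
theorem step_ball (s t₀ : Int) (m₀ : List Int) (t c i : Int) (m : List Int)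
    (p : Int × Int) (q : List (Int × Int)) (a : List Int) (t₁ : Int) (m₁ : List Int)
    (h : MInv s t₀ m₀ t m p q t₁ m₁) :
    (stepA (t, m, p, q, a) (c, s, i)).2.2.2.2
        = PySem.List.pySetD a i (t₀ - PySem.List.pyGetD m₀ c 0)
      ∧ MInv s t₀ m₀ (stepA (t, m, p, q, a) (c, s, i)).1
          (stepA (t, m, p, q, a) (c, s, i)).2.1
          (stepA (t, m, p, q, a) (c, s, i)).2.2.1
          (stepA (t, m, p, q, a) (c, s, i)).2.2.2.1
          (t₁ + s) (PySem.List.pySetD m₁ c (PySem.List.pyGetD m₁ c 0 + s)) := by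
  obtain ⟨hlm, hlm1, hlq, hTG, hTS, hTN, hTB, hC⟩ := h
  have hm0 : m₀.length = m.length := hlm.symm
  have hm1 : m₁.length = m.length := by rw [hlm1, ← hlm]
  simp only [stepA]
  split_ifs with h1 h2 h3
  case pos => -- p.2 ≠ s, buffer tag ≠ s : double flush
    obtain ⟨hv, hc', hlM1⟩ := color_flush s c m₀ m m₁ q hlq hm0 hm1 hC h2
    have ht0 : t + p.1 = t₀ := by rw [hTG]; exact hTN h1
    constructor
    · rw [hv, ht0]
    · exact ⟨hlM1.trans hlm, by rw [PySem.List.length_pySetD, hlm1],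
        by rw [PySem.List.length_pySetD, PySem.List.length_pySetD, hlq, hlM1],
        by omega, fun _ => ht0, fun hh => absurd rfl hh, Or.inr le_rfl, hc'⟩
  case neg => -- p.2 ≠ s, buffer tag = s : flush total only
    have h2' : (PySem.List.pyGetD q c ((0:Int), (0:Int))).2 = s := not_not.mp h2
    obtain ⟨hv, hc'⟩ := color_noflush s c m₀ m m₁ q hlq hm0 hm1 hC h2'
    have ht0 : t + p.1 = t₀ := by rw [hTG]; exact hTN h1
    constructor
    · rw [hv, ht0]
    · exact ⟨hlm, by rw [PySem.List.length_pySetD, hlm1],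
        by rw [PySem.List.length_pySetD, hlq],
        by omega, fun _ => ht0, fun hh => absurd rfl hh, Or.inr le_rfl, hc'⟩
  case pos => -- p.2 = s (so p.1 = 0, t = t₀), buffer tag ≠ s : flush color only
    have h1' : p.2 = s := not_not.mp h1
    obtain ⟨hv, hc', hlM1⟩ := color_flush s c m₀ m m₁ q hlq hm0 hm1 hC h3
    have ht0 : t = t₀ := hTS h1'
    constructor
    · rw [hv, ht0]
    · exact ⟨hlM1.trans hlm, by rw [PySem.List.length_pySetD, hlm1],
        by rw [PySem.List.length_pySetD, PySem.List.length_pySetD, hlq, hlM1],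
        by omega, fun _ => ht0, fun hh => absurd rfl hh, Or.inr le_rfl, hc'⟩
  case neg => -- no flush at all
    have h1' : p.2 = s := not_not.mp h1
    have h3' : (PySem.List.pyGetD q c ((0:Int), (0:Int))).2 = s := not_not.mp h3
    obtain ⟨hv, hc'⟩ := color_noflush s c m₀ m m₁ q hlq hm0 hm1 hC h3'
    have ht0 : t = t₀ := hTS h1'
    constructor
    · rw [hv, ht0]
    · exact ⟨hlm, by rw [PySem.List.length_pySetD, hlm1],
        by rw [PySem.List.length_pySetD, hlq],
        by omega, fun _ => ht0, fun hh => absurd rfl hh, Or.inr le_rfl, hc'⟩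


theorem writeGroup_cons (t0 : Int) (m0 : List Int) (x : Int × Int × Int)
    (g : List (Int × Int × Int)) (a : List Int) :
    writeGroup t0 m0 (x :: g) a
      = writeGroup t0 m0 g (PySem.List.pySetD a x.2.2 (t0 - PySem.List.pyGetD m0 x.1 0)) := rfl

theorem addGroupTotal_cons (x : Int × Int × Int) (g : List (Int × Int × Int)) (t : Int) :
    addGroupTotal (x :: g) t = addGroupTotal g (t + x.2.1) := rfl

theorem addGroupColor_cons (x : Int × Int × Int) (g : List (Int × Int × Int)) (m : List Int) :
    addGroupColor (x :: g) m
      = addGroupColor g (PySem.List.pySetD m x.1 (PySem.List.pyGetD m x.1 0 + x.2.1)) := rfl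

-- folding A over a whole run of size s yields B's group writes and re-establishes MInv
theorem run_fold (s t₀ : Int) (m₀ : List Int) :
    ∀ (grp : List (Int × Int × Int)) (t : Int) (m : List Int) (p : Int × Int)
      (q : List (Int × Int)) (a : List Int) (t₁ : Int) (m₁ : List Int),
      (∀ x ∈ grp, x.2.1 = s) → MInv s t₀ m₀ t m p q t₁ m₁ →
      (grp.foldl stepA (t, m, p, q, a)).2.2.2.2 = writeGroup t₀ m₀ grp a
        ∧ MInv s t₀ m₀ (grp.foldl stepA (t, m, p, q, a)).1
            (grp.foldl stepA (t, m, p, q, a)).2.1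
            (grp.foldl stepA (t, m, p, q, a)).2.2.1
            (grp.foldl stepA (t, m, p, q, a)).2.2.2.1
            (addGroupTotal grp t₁) (addGroupColor grp m₁) := by
  intro grp
  induction grp with
  | nil =>
    intro t m p q a t₁ m₁ _ h
    exact ⟨rfl, h⟩
  | cons x grp ih =>
    intro t m p q a t₁ m₁ hmem h
    obtain ⟨x1, x2, x3⟩ := x
    have hx : x2 = s := hmem (x1, x2, x3) (List.mem_cons_self)
    rw [hx] at hmem ⊢
    rw [List.foldl_cons, writeGroup_cons, addGroupTotal_cons, addGroupColor_cons]
    obtain ⟨hw, hmid⟩ := step_ball s t₀ m₀ t x1 x3 m p q a t₁ m₁ h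
    have hrec := ih (stepA (t, m, p, q, a) (x1, s, x3)).1
      (stepA (t, m, p, q, a) (x1, s, x3)).2.1
      (stepA (t, m, p, q, a) (x1, s, x3)).2.2.1
      (stepA (t, m, p, q, a) (x1, s, x3)).2.2.2.1
      (stepA (t, m, p, q, a) (x1, s, x3)).2.2.2.2
      (t₁ + s) (PySem.List.pySetD m₁ x1 (PySem.List.pyGetD m₁ x1 0 + s))
      (fun y hy => hmem y (List.mem_cons_of_mem _ hy)) hmid
    rw [← hw]
    exact hrec

theorem solveG_cons (b : Int × Int × Int) (tl : List (Int × Int × Int))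
    (total : Int) (tbc : List Int) (ans : List Int) :
    solveG (b :: tl) total tbc ans
      = solveG (tl.dropWhile (fun x => x.2.1 == b.2.1))
          (addGroupTotal (b :: tl.takeWhile (fun x => x.2.1 == b.2.1)) total)
          (addGroupColor (b :: tl.takeWhile (fun x => x.2.1 == b.2.1)) tbc)
          (writeGroup total tbc (b :: tl.takeWhile (fun x => x.2.1 == b.2.1)) ans) := by
  rw [solveG]

-- main coupling: A's fold over the sorted list equals B's group recursion
theorem solve_eq : ∀ (n : Nat) (g : List (Int × Int × Int)) (t : Int) (m : List Int)
    (p : Int × Int) (q : List (Int × Int)) (a : List Int) (t' : Int) (m' : List Int),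
    g.length ≤ n → g.Pairwise (fun x y => x.2.1 ≤ y.2.1) →
    (∀ b tl, g = b :: tl → GInv b.2.1 t m p q t' m') →
    (g.foldl stepA (t, m, p, q, a)).2.2.2.2 = solveG g t' m' a := by
  intro n
  induction n with
  | zero =>
    intro g t m p q a t' m' hlen _ _
    have hg : g = [] := List.eq_nil_of_length_eq_zero (Nat.le_zero.mp hlen)
    subst hg
    simp [solveG]
  | succ n ih =>
    intro g t m p q a t' m' hlen hsort hinv
    match g with
    | [] => simp [solveG]
    | b :: tl =>
      have hmid := ginv_to_mid (hinv b tl rfl)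
      have hgrp : ∀ x ∈ b :: tl.takeWhile (fun x => x.2.1 == b.2.1), x.2.1 = b.2.1 := by
        intro x hx
        rcases List.mem_cons.mp hx with hx | hx
        · rw [hx]
        · simpa using List.mem_takeWhile_imp hx
      obtain ⟨hw, hmid'⟩ := run_fold b.2.1 t' m'
        (b :: tl.takeWhile (fun x => x.2.1 == b.2.1)) t m p q a t' m' hgrp hmid
      have hsplit : (b :: tl.takeWhile (fun x => x.2.1 == b.2.1))
          ++ tl.dropWhile (fun x => x.2.1 == b.2.1) = b :: tl := by
        rw [List.cons_append, List.takeWhile_append_dropWhile]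
      conv_lhs => rw [← hsplit, List.foldl_append]
      rw [solveG_cons]
      have hrest : List.Sublist (tl.dropWhile (fun x => x.2.1 == b.2.1)) (b :: tl) :=
        (List.dropWhile_sublist _).trans (List.sublist_cons_self b tl)
      set r := ((b :: tl.takeWhile (fun x => x.2.1 == b.2.1)).foldl stepA (t, m, p, q, a)) with hr
      have hrec := ih (tl.dropWhile (fun x => x.2.1 == b.2.1))
        r.1 r.2.1 r.2.2.1 r.2.2.2.1 r.2.2.2.2
        (addGroupTotal (b :: tl.takeWhile (fun x => x.2.1 == b.2.1)) t')
        (addGroupColor (b :: tl.takeWhile (fun x => x.2.1 == b.2.1)) m')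
        (by
          have h1 : (tl.dropWhile (fun x => x.2.1 == b.2.1)).length ≤ tl.length :=
            (List.dropWhile_sublist _).length_le
          simp only [List.length_cons] at hlen
          omega)
        (hsort.sublist hrest)
        (by
          intro y ys hy
          have hPy : (fun x : Int × Int × Int => x.2.1 == b.2.1) y = false :=
            head_dropWhile_false _ tl y ys hy
          have hymem : y ∈ tl := (List.dropWhile_sublist _).subset (hy ▸ List.mem_cons_self)
          have hble : b.2.1 ≤ y.2.1 := (List.pairwise_cons.mp hsort).1 y hymem
          have hlt : b.2.1 < y.2.1 := by
            rcases lt_or_eq_of_le hble with h | h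
            · exact h
            · exfalso; simp [← h] at hPy
          exact mid_to_ginv hmid' hlt)
      rw [← hw]
      exact hrec

-- A's range(N) loop over balls[i] is a fold over the first N sorted balls
theorem foldRange (l : List (Int × Int × Int)) :
    ∀ (n : Nat), n ≤ l.length →
      ∀ (init : Int × List Int × (Int × Int) × List (Int × Int) × List Int),
      (PySem.List.pyRange 0 (n : Int) 1).foldl
          (fun st i => stepA st (PySem.List.pyGetD l i ((0:Int), (0:Int), (0:Int)))) init
        = (l.take n).foldl stepA init := by
  intro n
  induction n with
  | zero =>
    intro _ init
    simp [PySem.List.pyRange_one_eq_nil]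
  | succ n ih =>
    intro hn init
    have hn' : n ≤ l.length := Nat.le_of_succ_le hn
    have hcast : ((n + 1 : Nat) : Int) = (n : Int) + 1 := by push_cast; ring
    have htake : l.take (n + 1) = l.take n ++ [l[n]] := by
      rw [List.take_add_one, List.getElem?_eq_getElem hn, Option.toList_some]
    rw [hcast, PySem.List.pyRange_one_succ_right (by positivity), List.foldl_append,
      ih hn' init, htake, List.foldl_append]
    simp only [List.foldl_cons, List.foldl_nil]
    congr 1
    rw [PySem.List.pyGetD_natCast]
    simp [List.getD_eq_getElem?_getD, List.getElem?_eq_getElem hn]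

-- B's `[balls[k] for k in range(N)]` is the first-N prefix of the sorted list
theorem mapRange (l : List (Int × Int × Int)) :
    ∀ (n : Nat), n ≤ l.length →
      (PySem.List.pyRange 0 (n : Int) 1).map
          (fun k => PySem.List.pyGetD l k ((0:Int), (0:Int), (0:Int)))
        = l.take n := by
  intro n
  induction n with
  | zero =>
    intro _
    simp [PySem.List.pyRange_one_eq_nil]
  | succ n ih =>
    intro hn
    have hn' : n ≤ l.length := Nat.le_of_succ_le hn
    have hcast : ((n + 1 : Nat) : Int) = (n : Int) + 1 := by push_cast; ring
    have htake : l.take (n + 1) = l.take n ++ [l[n]] := by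
      rw [List.take_add_one, List.getElem?_eq_getElem hn, Option.toList_some]
    rw [hcast, PySem.List.pyRange_one_succ_right (by positivity), List.map_append,
      ih hn', htake]
    simp only [List.map_cons, List.map_nil, PySem.List.pyGetD_natCast]
    simp [List.getD_eq_getElem?_getD, List.getElem?_eq_getElem hn]

-- ===== VERDICT (by name: the statement is the Claim_ definition above) =====
theorem solution_spec : Claim_equal_solution := by
  intro N balls _ hpre
  obtain ⟨hNlen, hbounds⟩ := hpre
  unfold Spec_solution
  simp only [solution, solution_alt]
  rcases le_or_gt N 0 with hN0 | hN0
  · rw [PySem.List.pyRange_one_eq_nil hN0]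
    simp [solveG]
  · have hN0' : 0 ≤ N := le_of_lt hN0
    have hsb : (PySem.List.sorted balls (fun x => x.2.1) false).length = balls.length :=
      PySem.List.length_sorted _ _ _
    have hNt : ((N.toNat : Nat) : Int) = N := Int.toNat_of_nonneg hN0'
    have htake : N.toNat ≤ (PySem.List.sorted balls (fun x => x.2.1) false).length := by omega
    rw [← hNt, foldRange _ _ htake, mapRange _ _ htake]
    apply solve_eq ((PySem.List.sorted balls (fun x => x.2.1) false).take N.toNat).length
    · exact le_rfl
    · exact (PySem.List.sorted_pairwise balls (fun x => x.2.1)).sublist (List.take_sublist _ _) |>.imp (fun h => h)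
    · intro b tl _
      refine ⟨by simp, by simp, by ring, Or.inl rfl, fun k => ?_⟩
      rw [getD_replicate', getD_replicate']
      exact ⟨by ring, Or.inl rfl⟩
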